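-- pv_equiv track=rewrite | github.com/FernandoCallasaca/Examanes--Python | 08_10_2021/P2b.py | abejas_comidas
-- ===== SOURCE A (Python) =====
-- def abejas_comidas(actividades, dieta, dia):
--     indiceDieta = 0
--     contadorDias = 1
--     contadorComida = 0
--     for i in actividades:
--         if(i != '!' and i != '?'):
--             if(i == 'C'):
--                 contadorComida += 1
--         else:
--             if(contadorDias == dia):
--                 if(contadorComida!=0):
--                     dietaDIA = dieta[indiceDieta:indiceDieta+contadorComida]
--                     numeroAbejas = 0
--                     for i in dietaDIA:
--                         if(i=='A'):
--                             numeroAbejas += 1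
--                     return numeroAbejas
--                 else:
--                     return 0
--             else:
--                 if(contadorComida!=0):
--                     indiceDieta += contadorComida
--             contadorComida = 0
--             contadorDias += 1
-- ===== SOURCE B (Python) =====
-- def abejas_comidas(actividades, dieta, dia):
--     segments = actividades.replace('?', '!').split('!')
--     if dia < 1 or dia > len(segments) - 1:
--         return None
--     offset = sum(seg.count('C') for seg in segments[:dia - 1])
--     meals = segments[dia - 1].count('C')
--     return dieta[offset:offset + meals].count('A')
-- ===== Notes on version B (the rewrite author's own statement) =====
-- stated objective: alternative
-- what changed: Replaced A's single stateful character scan (day counter, diet index, meal counter, early return) by splitting the activity log into day segments (replace '?' by '!' then split on '!') and computing the diet offset and meal count by slice-and-count arithmetic over the segments.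
import Mathlib
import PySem

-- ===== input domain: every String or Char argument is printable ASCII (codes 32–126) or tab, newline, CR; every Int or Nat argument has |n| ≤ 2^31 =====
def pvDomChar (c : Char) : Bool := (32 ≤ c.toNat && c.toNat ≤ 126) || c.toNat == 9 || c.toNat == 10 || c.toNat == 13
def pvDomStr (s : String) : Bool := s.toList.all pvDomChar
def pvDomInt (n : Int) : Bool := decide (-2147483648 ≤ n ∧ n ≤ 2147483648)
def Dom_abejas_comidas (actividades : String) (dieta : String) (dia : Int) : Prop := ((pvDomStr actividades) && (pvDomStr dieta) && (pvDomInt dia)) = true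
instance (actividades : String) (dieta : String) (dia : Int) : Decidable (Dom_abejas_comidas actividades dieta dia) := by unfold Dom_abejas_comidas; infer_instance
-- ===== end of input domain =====

-- B replaces A's single stateful scan (day counter / diet index / meal counter, early return)
-- by replace-then-split into day segments followed by slice-and-count arithmetic; objective:
-- alternative decomposition, same value on every input (both programs are total); the timing
-- run measured B faster (C-level replace/split/count vs a per-character Python loop).

-- ===== PORT A =====
-- A's for-loop over actividades with state (indiceDieta, contadorDias, contadorComida) and early return
def abejasLoopA (dieta : String) (dia : Int) : List Char → Int → Int → Int → Option Int
  | [], _, _, _ => none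
  | i :: rest, indiceDieta, contadorDias, contadorComida =>
    if i ≠ '!' ∧ i ≠ '?' then
      abejasLoopA dieta dia rest indiceDieta contadorDias
        (if i = 'C' then contadorComida + 1 else contadorComida)
    else
      if contadorDias = dia then
        if contadorComida ≠ 0 then
          -- dietaDIA = dieta[indiceDieta:indiceDieta+contadorComida]; inner for-loop counts 'A'
          some ((PySem.List.slice dieta.toList (some indiceDieta) (some (indiceDieta + contadorComida))).foldl
            (fun numeroAbejas i => if i = 'A' then numeroAbejas + 1 else numeroAbejas) 0)
        else
          some 0
      else
        abejasLoopA dieta dia rest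
          (if contadorComida ≠ 0 then indiceDieta + contadorComida else indiceDieta)
          (contadorDias + 1) 0

def abejas_comidas (actividades : String) (dieta : String) (dia : Int) : Option Int :=
  abejasLoopA dieta dia actividades.toList 0 1 0

-- ===== PORT B =====
def abejas_comidas_alt (actividades : String) (dieta : String) (dia : Int) : Option Int :=
  let segments := PySem.Chars.splitOn (PySem.Chars.replace actividades.toList ['?'] ['!']) ['!']
  if dia < 1 ∨ dia > PySem.List.len segments - 1 then none
  else
    let offset : Int :=
      ((PySem.List.slice segments none (some (dia - 1))).map
        (fun seg => (PySem.Chars.count seg ['C'] : Int))).sum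
    let meals : Int := (PySem.Chars.count (PySem.List.pyGetD segments (dia - 1) []) ['C'] : Int)
    some ((PySem.Chars.count (PySem.List.slice dieta.toList (some offset) (some (offset + meals))) ['A'] : Int))

-- ===== PRECONDITION & SPEC =====
def Spec_abejas_comidas (actividades : String) (dieta : String) (dia : Int) (out : Option Int) : Prop := out = abejas_comidas_alt actividades dieta dia
instance (actividades : String) (dieta : String) (dia : Int) (out : Option Int) : Decidable (Spec_abejas_comidas actividades dieta dia out) := by unfold Spec_abejas_comidas; infer_instance

-- ===== CLAIM (what is proved, stated in full; the proofs are below) =====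
def Claim_equal_abejas_comidas : Prop := ∀ (actividades : String) (dieta : String) (dia : Int), Dom_abejas_comidas actividades dieta dia → Spec_abejas_comidas actividades dieta dia (abejas_comidas actividades dieta dia)

-- ===== LEMMAS AND PROOFS =====

def countC (seg : List Char) : Int := (seg.count 'C' : Int)

def split2 : List Char → List (List Char)
  | [] => [[]]
  | c :: cs => if c = '!' ∨ c = '?' then [] :: split2 cs else (split2 cs).modifyHead (c :: ·)

def bVal (dieta : List Char) (dia : Int) (counts : List Int) (idx dias : Int) : Option Int :=
  if dias ≤ dia ∧ dia < dias + counts.length - 1 then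
    let k := (dia - dias).toNat
    let start := idx + ((counts.take k).sum)
    some (((PySem.List.slice dieta (some start) (some (start + counts.getD k 0))).count 'A' : Int))
  else none

lemma split2_ne_nil (cs : List Char) : split2 cs ≠ [] := by
  induction cs with
  | nil => simp [split2]
  | cons c cs ih =>
    by_cases h : c = '!' ∨ c = '?'
    · simp [split2, h]
    · simp only [split2, if_neg h]
      cases hs : split2 cs with
      | nil => exact absurd hs ih
      | cons a l => simp

lemma bVal_shift (dieta : List Char) (dia a idx dias : Int) (cnts : List Int) (h : dias ≠ dia) :
    bVal dieta dia (a :: cnts) idx dias = bVal dieta dia cnts (idx + a) (dias + 1) := by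
  unfold bVal
  by_cases hc : dias + 1 ≤ dia ∧ dia < dias + 1 + cnts.length - 1
  · rw [if_pos (by constructor <;> [omega; (simpa using by omega)]), if_pos hc]
    have hk : (dia - dias).toNat = (dia - (dias + 1)).toNat + 1 := by omega
    simp [hk, List.take_succ_cons, List.getD_cons_succ, add_assoc]
  · rw [if_neg, if_neg hc]
    intro hcon
    apply hc
    have : dias ≤ dia := hcon.1
    constructor
    · omega
    · have := hcon.2; simp at this ⊢; omega

lemma countP_decide (l : List Char) : List.countP (fun x => decide (x = 'A')) l = l.count 'A' := by
  rw [List.count_eq_countP]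
  exact List.countP_congr (fun a _ => by simp)

lemma modifyHead_zero_add (l : List Int) : l.modifyHead (fun x => (0:Int) + x) = l := by
  cases l <;> simp

lemma loop_eq_bVal (dieta : String) (dia : Int) :
    ∀ (cs : List Char) (idx dias comida : Int), 0 ≤ idx → 0 ≤ comida →
    abejasLoopA dieta dia cs idx dias comida =
      bVal dieta.toList dia (((split2 cs).map countC).modifyHead (comida + ·)) idx dias := by
  intro cs
  induction cs with
  | nil =>
    intro idx dias comida hi hc
    simp [abejasLoopA, split2, bVal, countC]
  | cons c cs ih =>
    intro idx dias comida hi hc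
    by_cases h : c = '!' ∨ c = '?'
    · have hA : ¬(c ≠ '!' ∧ c ≠ '?') := by tauto
      rw [abejasLoopA, if_neg hA]
      simp only [split2, if_pos h, List.map_cons, List.modifyHead_cons]
      have hlen : 0 < (split2 cs).length := List.length_pos_of_ne_nil (split2_ne_nil cs)
      by_cases hd : dias = dia
      · subst hd
        have hcond : dias ≤ dias ∧ dias <
            dias + (((comida + countC []) :: (split2 cs).map countC).length : Int) - 1 := by
          refine ⟨le_refl _, ?_⟩
          simp only [List.length_cons, List.length_map]
          push_cast
          omega
        rw [bVal, if_pos hcond]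
        simp only [sub_self, Int.toNat_zero, List.take_zero, List.sum_nil, add_zero,
          List.getD_cons_zero, countC, List.count_nil, Int.natCast_zero]
        by_cases hz : comida ≠ 0
        · rw [if_pos hz]
          rw [PySem.List.foldl_ite_add_one]
          simp [countP_decide]
        · rw [if_neg hz]
          push_neg at hz
          subst hz
          have hslice : PySem.List.slice dieta.toList (some idx) (some idx) = [] := by
            rw [PySem.List.slice_toNat _ (by omega) (by omega)]
            simp
          simp [hslice]
      · have hidx : (if comida ≠ 0 then idx + comida else idx) = idx + comida := by
          split_ifs with hcc
          · rfl
          · push_neg at hcc; omega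
        rw [if_neg hd, hidx, ih (idx + comida) (dias + 1) 0 (by omega) le_rfl, modifyHead_zero_add]
        have hsh := bVal_shift dieta.toList dia (comida + countC []) idx dias ((split2 cs).map countC) hd
        simp only [countC, List.count_nil, Int.natCast_zero, add_zero] at hsh
        rw [← hsh]
        simp [countC]
    · have hA : (c ≠ '!' ∧ c ≠ '?') := by tauto
      rw [abejasLoopA, if_pos hA]
      rw [ih idx dias _ hi (by split_ifs <;> omega)]
      congr 1
      obtain ⟨s0, rest, hs⟩ : ∃ s0 rest, split2 cs = s0 :: rest := by
        cases hs : split2 cs with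
        | nil => exact absurd hs (split2_ne_nil cs)
        | cons a l => exact ⟨a, l, rfl⟩
      simp only [split2, if_neg h, hs, List.modifyHead_cons, List.map_cons]
      have hcc : countC (c :: s0) = (if c = 'C' then 1 else 0) + countC s0 := by
        simp [countC, List.count_cons]
        split_ifs with h1 <;> simp_all <;> omega
      rw [hcc]
      congr 1
      split_ifs <;> ring

def splitc (d : Char) : List Char → List (List Char)
  | [] => [[]]
  | c :: cs => if c = d then [] :: splitc d cs else (splitc d cs).modifyHead (c :: ·)

lemma modifyHead_id' {α : Type} (l : List α) : l.modifyHead (fun x => x) = l := by cases l <;> simp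

lemma count_go_single (c0 : Char) (s : List Char) : ∀ (fuel acc : Nat), s.length ≤ fuel →
    PySem.Chars.count.go [c0] fuel s acc = acc + s.count c0 := by
  induction s with
  | nil => intro fuel acc h; cases fuel <;> simp [PySem.Chars.count.go]
  | cons c t ih =>
    intro fuel acc h
    cases fuel with
    | zero => simp at h
    | succ f =>
      have hlt : t.length ≤ f := by simpa using h
      simp only [PySem.Chars.count.go]
      by_cases hcx : c0 = c
      · subst hcx
        simp only [List.isPrefixOf, BEq.rfl, Bool.true_and, if_pos]
        simp [ih f (acc+1) hlt, List.count_cons]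
        omega
      · simp [List.isPrefixOf, Ne.symm hcx, hcx, ih f acc hlt]

lemma count_single (s : List Char) (c0 : Char) : PySem.Chars.count s [c0] = s.count c0 := by
  have := count_go_single c0 s s.length 0 le_rfl
  simp [PySem.Chars.count]
  omega

lemma replace_single (s : List Char) (o n : Char) :
    PySem.Chars.replace s [o] [n] = s.map (fun c => if c = o then n else c) := by
  have go : ∀ (t : List Char) (fuel : Nat) (acc : List Char), t.length ≤ fuel →
      PySem.Chars.replace.go [o] [n] fuel t acc = acc.reverse ++ t.map (fun c => if c = o then n else c) := by
    intro t
    induction t with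
    | nil => intro fuel acc h; cases fuel <;> simp [PySem.Chars.replace.go]
    | cons c t ih =>
      intro fuel acc h
      cases fuel with
      | zero => simp at h
      | succ f =>
        have hlt : t.length ≤ f := by simpa using h
        simp only [PySem.Chars.replace.go]
        by_cases hcx : o = c
        · subst hcx
          simp only [List.isPrefixOf, BEq.rfl, Bool.true_and, if_pos]
          simp [ih f _ hlt]
        · simp [List.isPrefixOf, Ne.symm hcx, hcx, ih f _ hlt]
  simp [PySem.Chars.replace, go s s.length [] le_rfl]

lemma splitOn_single (d : Char) (s : List Char) : PySem.Chars.splitOn s [d] = splitc d s := by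
  have go : ∀ (t : List Char) (fuel : Nat) (cur : List Char) (acc : List (List Char)), t.length ≤ fuel →
      PySem.Chars.splitOn.go [d] fuel t cur acc = acc.reverse ++ (splitc d t).modifyHead (cur.reverse ++ ·) := by
    intro t
    induction t with
    | nil => intro fuel cur acc h; cases fuel <;> simp [PySem.Chars.splitOn.go, splitc]
    | cons c t ih =>
      intro fuel cur acc h
      cases fuel with
      | zero => simp at h
      | succ f =>
        have hlt : t.length ≤ f := by simpa using h
        simp only [PySem.Chars.splitOn.go]
        by_cases hcx : d = c
        · subst hcx
          simp only [List.isPrefixOf, BEq.rfl, Bool.true_and, if_pos]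
          simp [ih f _ _ hlt, splitc, modifyHead_id']
        · simp only [List.isPrefixOf]
          simp [Ne.symm hcx, ih f _ _ hlt, splitc, hcx, List.modifyHead_modifyHead]
          cases splitc d t <;> simp
  simp [PySem.Chars.splitOn, go s (s.length + 1) [] [] (by omega), modifyHead_id']

lemma splitc_map_fix (s : List Char) :
    splitc '!' (s.map (fun c => if c = '?' then '!' else c)) = split2 s := by
  induction s with
  | nil => rfl
  | cons c cs ih =>
    by_cases h : c = '!' ∨ c = '?'
    · rcases h with h | h <;> subst h <;> simp [splitc, split2, ih]
    · push_neg at h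
      simp [splitc, split2, h.1, h.2, ih]

lemma ports_agree (actividades dieta : String) (dia : Int) :
    abejas_comidas actividades dieta dia = abejas_comidas_alt actividades dieta dia := by
  have hsegs : PySem.Chars.splitOn (PySem.Chars.replace actividades.toList ['?'] ['!']) ['!']
      = split2 actividades.toList := by
    rw [replace_single, splitOn_single, splitc_map_fix]
  rw [abejas_comidas, abejas_comidas_alt, loop_eq_bVal dieta dia actividades.toList 0 1 0 le_rfl le_rfl,
    modifyHead_zero_add]
  rw [hsegs]
  set segs := split2 actividades.toList with hdef
  have hlen : 0 < segs.length := List.length_pos_of_ne_nil (split2_ne_nil _)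
  by_cases hguard : dia < 1 ∨ dia > (segs.length : Int) - 1
  · rw [if_pos (by simpa using hguard)]
    rw [bVal, if_neg (by simp only [List.length_map]; push_cast; omega)]
  · push_neg at hguard
    obtain ⟨h1, h2⟩ := hguard
    rw [if_neg (by simp; push_cast; omega)]
    rw [bVal, if_pos (by constructor <;> [omega; (push_cast; simp; omega)])]
    have hk : (dia - 1).toNat < segs.length := by omega
    have hoff : ((PySem.List.slice segs none (some (dia - 1))).map
        (fun seg => (PySem.Chars.count seg ['C'] : Int))).sum
        = ((segs.map countC).take (dia - 1).toNat).sum := by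
      rw [PySem.List.slice_to _ (by omega), ← List.map_take]
      congr 1
      exact List.map_congr_left (fun seg _ => by rw [count_single]; rfl)
    have hmeal : (PySem.Chars.count (PySem.List.pyGetD segs (dia - 1) []) ['C'] : Int)
        = (segs.map countC).getD (dia - 1).toNat 0 := by
      rw [PySem.List.pyGetD_eq_getElem _ _ (by omega) (by push_cast; omega)]
      rw [List.getD_eq_getElem _ _ (by simpa using hk), List.getElem_map]
      rw [count_single]
      rfl
    rw [hoff, hmeal]
    simp only [count_single]
    simp

-- ===== VERDICT (by name: the statement is the Claim_ definition above) =====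
theorem abejas_comidas_spec : Claim_equal_abejas_comidas := by
  intro actividades dieta dia _
  simpa [Spec_abejas_comidas] using ports_agree actividades dieta dia
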